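-- pv_equiv track=rewrite | github.com/Sodalicus/python_learning | How_to_Think_Like_a_Computer_Scientist/chapter14/algorithms.py | lotto_match
-- ===== SOURCE A (Python) =====
-- def lotto_match(draw_list, ticket_list):
--     """ Return number of hits of numbers from lotto ticket against draft numbers. """
--     tick_sorted = ticket_list[:]
--     draw_sorted = draw_list[:]
--     tick_sorted.sort()
--     draw_sorted.sort()
--     hits = 0
--     di = 0
--     ti = 0
--
--     while True:
--         if di >= len(draw_sorted) or ti >= len(tick_sorted):
--             return hits
--
--         if draw_sorted[di] == tick_sorted[ti]:
--             hits += 1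
--             di += 1
--             ti += 1
--
--         elif draw_sorted[di] < tick_sorted[ti]:
--             di += 1
--         else: # draw_sorted[di] > tick_sorted[ti]
--             ti += 1
-- ===== SOURCE B (Python) =====
-- def lotto_match(draw_list, ticket_list):
--     """ Return number of hits of numbers from lotto ticket against draft numbers. """
--     remaining = list(draw_list)
--     hits = 0
--     for t in ticket_list:
--         if t in remaining:
--             remaining.remove(t)
--             hits += 1
--     return hits
-- ===== Notes on version B (the rewrite author's own statement) =====
-- stated objective: simpler
-- what changed: Replaces the sort-both-copies + two synchronized index pointers merge with a single pass over the ticket that consumes matches from a mutable copy of the draw list (membership test + remove), no sorting and no index arithmetic.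
import Mathlib
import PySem

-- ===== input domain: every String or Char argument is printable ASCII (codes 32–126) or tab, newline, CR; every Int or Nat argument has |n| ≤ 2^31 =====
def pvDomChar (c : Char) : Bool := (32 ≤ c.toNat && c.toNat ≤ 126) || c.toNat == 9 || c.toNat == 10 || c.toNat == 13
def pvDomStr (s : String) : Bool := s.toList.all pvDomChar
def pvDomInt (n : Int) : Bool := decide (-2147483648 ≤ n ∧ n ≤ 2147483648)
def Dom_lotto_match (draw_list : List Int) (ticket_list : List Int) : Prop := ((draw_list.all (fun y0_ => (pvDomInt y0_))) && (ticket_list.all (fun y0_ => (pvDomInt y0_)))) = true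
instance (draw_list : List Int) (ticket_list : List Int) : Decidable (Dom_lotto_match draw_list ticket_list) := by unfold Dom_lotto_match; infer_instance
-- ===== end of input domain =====

-- B replaces A's sort-both-lists + two-pointer merge with a single pass over the
-- ticket that consumes matches from a copy of the draw list (objective: simpler).

-- ===== PORT A =====
-- the while loop of A: state (hits, di, ti) over the two sorted lists
def lottoLoopA (draw_sorted tick_sorted : List Int) (hits : Int) (di ti : Nat) : Int :=
  if di ≥ draw_sorted.length ∨ ti ≥ tick_sorted.length then hits
  else
    -- indices are in range here (guard above), so getD is exactly Python's draw_sorted[di]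
    let d := draw_sorted.getD di 0
    let t := tick_sorted.getD ti 0
    if d = t then lottoLoopA draw_sorted tick_sorted (hits + 1) (di + 1) (ti + 1)
    else if d < t then lottoLoopA draw_sorted tick_sorted hits (di + 1) ti
    else lottoLoopA draw_sorted tick_sorted hits di (ti + 1)
termination_by (draw_sorted.length - di) + (tick_sorted.length - ti)
decreasing_by all_goals omega

def lotto_match (draw_list : List Int) (ticket_list : List Int) : Int :=
  let tick_sorted := PySem.List.sorted ticket_list (fun x => x) false
  let draw_sorted := PySem.List.sorted draw_list (fun x => x) false
  lottoLoopA draw_sorted tick_sorted 0 0 0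

-- ===== PORT B =====
-- one step of B's for-loop: consume t from the remaining draw numbers if present
def lottoStepB (st : List Int × Int) (t : Int) : List Int × Int :=
  if t ∈ st.1 then (st.1.erase t, st.2 + 1) else st

def lotto_match_alt (draw_list : List Int) (ticket_list : List Int) : Int :=
  (ticket_list.foldl lottoStepB (draw_list, 0)).2

-- ===== PRECONDITION & SPEC =====
def Spec_lotto_match (draw_list : List Int) (ticket_list : List Int) (out : Int) : Prop := out = lotto_match_alt draw_list ticket_list
instance (draw_list : List Int) (ticket_list : List Int) (out : Int) : Decidable (Spec_lotto_match draw_list ticket_list out) := by unfold Spec_lotto_match; infer_instance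

-- ===== CLAIM (what is proved, stated in full; the proofs are below) =====
def Claim_equal_lotto_match : Prop := ∀ (draw_list : List Int) (ticket_list : List Int), Dom_lotto_match draw_list ticket_list → Spec_lotto_match draw_list ticket_list (lotto_match draw_list ticket_list)

-- ===== LEMMAS AND PROOFS =====

-- B's fold counts the cardinality of the multiset intersection.
theorem lottoFoldB_card (ts : List Int) : ∀ (rem : List Int) (hits : Int),
    (ts.foldl lottoStepB (rem, hits)).2
      = hits + ((rem : Multiset Int) ∩ (ts : Multiset Int)).card := by
  induction ts with
  | nil => intro rem hits; simp
  | cons t ts ih =>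
    intro rem hits
    by_cases h : t ∈ rem
    · simp only [List.foldl_cons, lottoStepB, if_pos h, ih]
      have : ((t ::ₘ (ts : Multiset Int)) ∩ (rem : Multiset Int))
          = t ::ₘ ((ts : Multiset Int) ∩ ((rem : Multiset Int).erase t)) :=
        Multiset.cons_inter_of_pos _ (by simpa using h)
      rw [show ((rem : Multiset Int) ∩ ((t :: ts : List Int) : Multiset Int))
            = ((t ::ₘ (ts : Multiset Int)) ∩ (rem : Multiset Int)) by
          rw [Multiset.inter_comm]; simp, this]
      rw [show ((rem.erase t : List Int) : Multiset Int)
            = (rem : Multiset Int).erase t from (Multiset.coe_erase rem t).symm] at *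
      rw [Multiset.inter_comm]
      simp [Multiset.coe_erase]
      ring
    · simp only [List.foldl_cons, lottoStepB, if_neg h, ih]
      have : ((t ::ₘ (ts : Multiset Int)) ∩ (rem : Multiset Int))
          = (ts : Multiset Int) ∩ (rem : Multiset Int) :=
        Multiset.cons_inter_of_neg _ (by simpa using h)
      rw [show ((rem : Multiset Int) ∩ ((t :: ts : List Int) : Multiset Int))
            = ((t ::ₘ (ts : Multiset Int)) ∩ (rem : Multiset Int)) by
          rw [Multiset.inter_comm]; simp, this, Multiset.inter_comm]

-- A's merge loop counts the same cardinality, given both lists are sorted.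
theorem lottoLoopA_card (d t : List Int) (hits : Int) (di ti : Nat)
    (hd : d.Pairwise (· ≤ ·)) (ht : t.Pairwise (· ≤ ·)) :
    lottoLoopA d t hits di ti
      = hits + (((d.drop di : List Int) : Multiset Int) ∩ ((t.drop ti : List Int) : Multiset Int)).card := by
  induction hits, di, ti using lottoLoopA.induct d t with
  | case1 hits di ti hguard =>
    rw [lottoLoopA, if_pos hguard]
    rcases hguard with h | h
    · rw [List.drop_eq_nil_of_le h]; simp
    · rw [List.drop_eq_nil_of_le h]; simp
  | case2 hits di ti hguard a b heq ih =>
    have hdi : di < d.length := by omega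
    have hti : ti < t.length := by omega
    have heq' : d.getD di 0 = t.getD ti 0 := heq
    have ha : d.getD di 0 = d[di] := by
      simp [List.getD_eq_getElem?_getD, List.getElem?_eq_getElem hdi]
    have hb : t.getD ti 0 = t[ti] := by
      simp [List.getD_eq_getElem?_getD, List.getElem?_eq_getElem hti]
    rw [lottoLoopA, if_neg hguard, if_pos heq', ih,
        List.drop_eq_getElem_cons hdi, List.drop_eq_getElem_cons hti]
    rw [show ((d[di] :: d.drop (di+1) : List Int) : Multiset Int)
          = d[di] ::ₘ (d.drop (di+1) : List Int) from rfl,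
        show ((t[ti] :: t.drop (ti+1) : List Int) : Multiset Int)
          = t[ti] ::ₘ (t.drop (ti+1) : List Int) from rfl]
    rw [Multiset.cons_inter_of_pos _
        (by rw [← ha, ← hb, heq', hb]; exact Multiset.mem_cons_self _ _)]
    rw [show (t[ti] ::ₘ ((t.drop (ti+1) : List Int) : Multiset Int)).erase d[di]
          = ((t.drop (ti+1) : List Int) : Multiset Int) by
        rw [← ha, ← hb, heq', hb, Multiset.erase_cons_head]]
    simp
    ring
  | case3 hits di ti hguard a b hne hlt ih =>
    have hdi : di < d.length := by omega
    have hti : ti < t.length := by omega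
    have hne' : ¬ d.getD di 0 = t.getD ti 0 := hne
    have hlt' : d.getD di 0 < t.getD ti 0 := hlt
    have ha : d.getD di 0 = d[di] := by
      simp [List.getD_eq_getElem?_getD, List.getElem?_eq_getElem hdi]
    have hb : t.getD ti 0 = t[ti] := by
      simp [List.getD_eq_getElem?_getD, List.getElem?_eq_getElem hti]
    rw [lottoLoopA, if_neg hguard, if_neg hne', if_pos hlt', ih]
    congr 2
    rw [List.drop_eq_getElem_cons hdi]
    rw [show ((d[di] :: d.drop (di+1) : List Int) : Multiset Int)
          = d[di] ::ₘ (d.drop (di+1) : List Int) from rfl]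
    rw [Multiset.cons_inter_of_neg]
    intro hmem
    have hmem' : d[di] ∈ t.drop ti := by simpa using hmem
    have hpw : (t.drop ti).Pairwise (· ≤ ·) := ht.drop
    rw [List.drop_eq_getElem_cons hti] at hmem' hpw
    rcases List.mem_cons.mp hmem' with h | h
    · rw [ha, hb] at hlt'; omega
    · have hle := (List.pairwise_cons.mp hpw).1 _ h
      rw [ha, hb] at hlt'; omega
  | case4 hits di ti hguard a b hne hnlt ih =>
    have hdi : di < d.length := by omega
    have hti : ti < t.length := by omega
    have hne' : ¬ d.getD di 0 = t.getD ti 0 := hne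
    have hnlt' : ¬ d.getD di 0 < t.getD ti 0 := hnlt
    have ha : d.getD di 0 = d[di] := by
      simp [List.getD_eq_getElem?_getD, List.getElem?_eq_getElem hdi]
    have hb : t.getD ti 0 = t[ti] := by
      simp [List.getD_eq_getElem?_getD, List.getElem?_eq_getElem hti]
    rw [lottoLoopA, if_neg hguard, if_neg hne', if_neg hnlt', ih]
    congr 2
    rw [List.drop_eq_getElem_cons hti]
    rw [show ((t[ti] :: t.drop (ti+1) : List Int) : Multiset Int)
          = t[ti] ::ₘ (t.drop (ti+1) : List Int) from rfl]
    have hnm : t[ti] ∉ ((d.drop di : List Int) : Multiset Int) := by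
      intro hmem
      have hmem' : t[ti] ∈ d.drop di := by simpa using hmem
      have hpw : (d.drop di).Pairwise (· ≤ ·) := hd.drop
      rw [List.drop_eq_getElem_cons hdi] at hmem' hpw
      have hgt : t[ti] < d[di] := by rw [← ha, ← hb]; omega
      rcases List.mem_cons.mp hmem' with h | h
      · omega
      · have hle := (List.pairwise_cons.mp hpw).1 _ h
        omega
    conv_rhs => rw [Multiset.inter_comm, Multiset.cons_inter_of_neg _ hnm, Multiset.inter_comm]
-- ===== VERDICT (by name: the statement is the Claim_ definition above) =====
theorem lotto_match_spec : Claim_equal_lotto_match := by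
  intro draw_list ticket_list _
  unfold Spec_lotto_match lotto_match lotto_match_alt
  rw [lottoFoldB_card]
  rw [lottoLoopA_card _ _ _ _ _
    (by simpa using PySem.List.sorted_pairwise draw_list (fun x => x))
    (by simpa using PySem.List.sorted_pairwise ticket_list (fun x => x))]
  simp only [List.drop_zero, zero_add]
  congr 1
  rw [Multiset.coe_eq_coe.mpr (PySem.List.sorted_perm draw_list (fun x => x) false),
      Multiset.coe_eq_coe.mpr (PySem.List.sorted_perm ticket_list (fun x => x) false)]
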